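-- pv_equiv track=rewrite | github.com/ArtyomArmitage/Parcial-I | Revisión Personal/Parcial I. Ejercicio IV.py | next_higher_temp
-- ===== SOURCE A (Python) =====
-- def next_higher_temp(temperaturas):
--     days=[]
--     for i in range(len(temperaturas)-1):
--         position=1
--         while position<=len(temperaturas)-1-i:
--             if temperaturas[i]<temperaturas[i+position]:
--                 days.append(position)
--                 break
--             position+=1
--             if position==len(temperaturas)-i:
--                 days.append(0)
--     days.append(0)
--     return days
-- ===== SOURCE B (Python) =====
-- def next_higher_temp(temperaturas):
--     n = len(temperaturas)
--     days = [0] * n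
--     stack = []  # indices with no strictly higher temperature seen yet
--     for i in range(n):
--         t = temperaturas[i]
--         while stack and temperaturas[stack[-1]] < t:
--             j = stack.pop()
--             days[j] = i - j
--         stack.append(i)
--     return days
-- ===== Notes on version B (the rewrite author's own statement) =====
-- stated objective: faster
-- what changed: Replaces the nested rescans (for each day, a while-loop over the remaining days) with a single left-to-right pass over a monotonic stack of pending indices, filling a preallocated result array.
-- intended difference: On the empty list A returns a spurious one-element list holding a single zero (its unconditional trailing append fires even with no days), while B returns the empty list, the intended answer of length len(temperaturas). — e.g. on next_higher_temp([]): A returns [0], B returns []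
import Mathlib
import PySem

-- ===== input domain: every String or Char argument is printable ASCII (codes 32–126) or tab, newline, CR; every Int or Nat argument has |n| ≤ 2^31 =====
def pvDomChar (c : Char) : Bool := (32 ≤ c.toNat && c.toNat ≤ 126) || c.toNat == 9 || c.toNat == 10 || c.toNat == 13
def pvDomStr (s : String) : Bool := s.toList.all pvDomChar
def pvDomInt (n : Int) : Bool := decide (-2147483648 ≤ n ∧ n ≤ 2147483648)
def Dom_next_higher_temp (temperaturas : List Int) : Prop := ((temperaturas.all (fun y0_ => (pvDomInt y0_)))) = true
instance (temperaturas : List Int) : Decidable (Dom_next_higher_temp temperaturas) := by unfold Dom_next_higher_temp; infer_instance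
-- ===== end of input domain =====

-- B replaces A's per-day rescan of the remaining list with a single pass over a
-- monotonic stack of pending indices (asymptotically faster as measured).

-- ===== PORT A =====
-- inner while-loop of A for day index i, starting at `position = pos`;
-- returns the value A appends to `days` for this i (A always appends exactly one).
def nhtInner (ts : List Int) (i pos : Nat) : Int :=
  if (pos : Int) ≤ (ts.length : Int) - 1 - (i : Int) then
    if PySem.List.pyGetD ts (i : Int) 0 < PySem.List.pyGetD ts ((i : Int) + (pos : Int)) 0 then
      (pos : Int)
    else if (pos : Int) + 1 = (ts.length : Int) - (i : Int) then 0
    else nhtInner ts i (pos + 1)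
  else 0
termination_by ts.length - (i + pos)
decreasing_by
  omega

def next_higher_temp (temperaturas : List Int) : List Int :=
  ((List.range (temperaturas.length - 1)).map (fun i => nhtInner temperaturas i 1)) ++ [0]

-- ===== PORT B =====
-- the while-loop of B: pop pending indices whose temperature is below t, writing their answers.
def popAll (ts : List Int) (days : List Int) (stack : List Nat) (i : Nat) (t : Int) :
    List Int × List Nat :=
  match stack with
  | [] => (days, [])
  | j :: rest =>
    if PySem.List.pyGetD ts (j : Int) 0 < t then
      popAll ts (days.set j ((i : Int) - (j : Int))) rest i t
    else (days, j :: rest)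

def next_higher_temp_alt (temperaturas : List Int) : List Int :=
  ((List.range temperaturas.length).foldl
    (fun (st : List Int × List Nat) (i : Nat) =>
      let t := PySem.List.pyGetD temperaturas (i : Int) 0
      let p := popAll temperaturas st.1 st.2 i t
      (p.1, i :: p.2))
    (List.replicate temperaturas.length 0, [])).1

-- ===== PRECONDITION & SPEC =====
-- On the empty list A returns a spurious one-element list holding a single zero (its
-- unconditional trailing append fires even with no days), while B returns the empty
-- list, the intended answer of length len(temperaturas).
def D_next_higher_temp (temperaturas : List Int) : Prop := temperaturas = []
instance (temperaturas : List Int) : Decidable (D_next_higher_temp temperaturas) := by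
  unfold D_next_higher_temp; infer_instance

def Spec_next_higher_temp (temperaturas : List Int) (out : List Int) : Prop :=
  ¬ D_next_higher_temp temperaturas → out = next_higher_temp_alt temperaturas
instance (temperaturas : List Int) (out : List Int) : Decidable (Spec_next_higher_temp temperaturas out) := by
  unfold Spec_next_higher_temp; infer_instance

def pvDiffWitness_next_higher_temp : List Int := []
def pvDiffWitnessOut_next_higher_temp : (List Int) × (List Int) := ([0], [])

-- ===== CLAIM (what is proved, stated in full; the proofs are below) =====
def Claim_unchanged_next_higher_temp : Prop := ∀ (temperaturas : List Int), Dom_next_higher_temp temperaturas → Spec_next_higher_temp temperaturas (next_higher_temp temperaturas)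
def Claim_changed_next_higher_temp : Prop := Dom_next_higher_temp (pvDiffWitness_next_higher_temp) ∧ D_next_higher_temp (pvDiffWitness_next_higher_temp) ∧ next_higher_temp (pvDiffWitness_next_higher_temp) = pvDiffWitnessOut_next_higher_temp.1 ∧ next_higher_temp_alt (pvDiffWitness_next_higher_temp) = pvDiffWitnessOut_next_higher_temp.2 ∧ pvDiffWitnessOut_next_higher_temp.1 ≠ pvDiffWitnessOut_next_higher_temp.2
def Claim_exact_next_higher_temp : Prop := ∀ (temperaturas : List Int), Dom_next_higher_temp temperaturas → D_next_higher_temp temperaturas → next_higher_temp temperaturas ≠ next_higher_temp_alt temperaturas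

-- ===== LEMMAS AND PROOFS =====

-- ts[i] read the way both ports read it
def tval (ts : List Int) (i : Nat) : Int := PySem.List.pyGetD ts (i : Int) 0

-- the common specification: for day i, the number of days until the next strictly
-- higher temperature, 0 if there is none
def specF (ts : List Int) (i : Nat) : Int :=
  match (ts.drop (i + 1)).findIdx? (fun x => tval ts i < x) with
  | some k => (k : Int) + 1
  | none => 0

lemma tval_eq (ts : List Int) (i : Nat) (h : i < ts.length) : tval ts i = ts[i] := by
  simp [tval, PySem.List.pyGetD_natCast, List.getD, h]

-- ---- A equals specF ----
lemma nhtInner_eq (ts : List Int) (i pos : Nat) :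
    nhtInner ts i pos =
      match (ts.drop (i + pos)).findIdx? (fun x => tval ts i < x) with
      | some k => (pos : Int) + (k : Int)
      | none => 0 := by
  induction hk : ts.length - (i + pos) using Nat.strong_induction_on generalizing pos with
  | _ n IH =>
  rw [nhtInner]
  by_cases h1 : (pos : Int) ≤ (ts.length : Int) - 1 - (i : Int)
  · have hlt : i + pos < ts.length := by omega
    rw [if_pos h1, List.drop_eq_getElem_cons hlt, List.findIdx?_cons]
    have hget : PySem.List.pyGetD ts ((i : Int) + (pos : Int)) 0 = ts[i + pos] := by
      rw [show ((i : Int) + (pos : Int)) = ((i + pos : Nat) : Int) by push_cast; ring]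
      exact tval_eq ts (i + pos) hlt
    rw [hget]
    by_cases h2 : PySem.List.pyGetD ts (i : Int) 0 < ts[i + pos]
    · have hdec : decide (tval ts i < ts[i + pos]) = true := decide_eq_true h2
      rw [if_pos h2, hdec]
      simp
    · have hdec : decide (tval ts i < ts[i + pos]) = false := decide_eq_false h2
      rw [if_neg h2, hdec]
      simp only [Bool.false_eq_true, if_false]
      by_cases h3 : (pos : Int) + 1 = (ts.length : Int) - (i : Int)
      · rw [if_pos h3]
        have : i + pos + 1 = ts.length := by omega
        rw [this, List.drop_length]
        simp
      · rw [if_neg h3]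
        have hrec := IH (ts.length - (i + (pos + 1))) (by omega) (pos + 1) rfl
        rw [show i + pos + 1 = i + (pos + 1) by ring] at *
        rw [hrec]
        cases hfi : (ts.drop (i + (pos + 1))).findIdx? (fun x => decide (tval ts i < x)) with
        | none => simp
        | some k' => simp; ring
  · rw [if_neg h1]
    have : ts.length ≤ i + pos := by omega
    rw [List.drop_eq_nil_of_le this]
    simp

lemma A_eq_spec (ts : List Int) (h : ts ≠ []) :
    next_higher_temp ts = (List.range ts.length).map (specF ts) := by
  have hn : ts.length ≠ 0 := by simpa using h
  conv_rhs => rw [show ts.length = (ts.length - 1) + 1 by omega, List.range_succ]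
  rw [List.map_append]
  unfold next_higher_temp
  congr 1
  · apply List.map_congr_left
    intro i hi
    rw [nhtInner_eq]
    unfold specF
    cases hfi : (ts.drop (i + 1)).findIdx? (fun x => decide (tval ts i < x)) with
    | none => simp
    | some k => simp; ring
  · have hd : ts.drop (ts.length - 1 + 1) = [] := by
      rw [show ts.length - 1 + 1 = ts.length by omega]; simp
    simp [specF, hd]

-- ---- B equals specF ----
def NgeInv (ts : List Int) (i : Nat) (days : List Int) (stack : List Nat) : Prop :=
  days.length = ts.length ∧
  (∀ j ∈ stack, j < i) ∧
  stack.Pairwise (fun a b => b < a ∧ tval ts a ≤ tval ts b) ∧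
  (∀ j ∈ stack, ∀ k, j < k → k < i → tval ts k ≤ tval ts j) ∧
  (∀ j, j < ts.length → days.getD j 0 = if j < i ∧ j ∉ stack then specF ts j else 0)

lemma getD_set (l : List Int) (i j : Nat) (a : Int) :
    (l.set i a).getD j 0 = if i = j ∧ i < l.length then a else l.getD j 0 := by
  simp only [List.getD_eq_getElem?_getD, List.getElem?_set]
  split_ifs <;> simp_all <;> omega

-- when index j is popped at step i, its true answer is i - j
lemma spec_found (ts : List Int) (j i : Nat) (hj : j < i) (hi : i < ts.length)
    (hbetween : ∀ k, j < k → k < i → tval ts k ≤ tval ts j)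
    (hhit : tval ts j < tval ts i) : specF ts j = (i : Int) - (j : Int) := by
  unfold specF
  have hfind : (ts.drop (j + 1)).findIdx? (fun x => decide (tval ts j < x)) = some (i - j - 1) := by
    rw [List.findIdx?_eq_some_iff_getElem]
    have hb : i - j - 1 < (ts.drop (j + 1)).length := by simp; omega
    refine ⟨hb, ?_, ?_⟩
    · rw [List.getElem_drop]
      have he : j + 1 + (i - j - 1) = i := by omega
      simp only [he]
      rw [← tval_eq ts i hi]
      simpa using hhit
    · intro m hm
      rw [List.getElem_drop]
      have h1 : j < j + 1 + m := by omega
      have h2 : j + 1 + m < i := by omega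
      have h3 : j + 1 + m < ts.length := by omega
      rw [← tval_eq ts (j + 1 + m) h3]
      simpa using not_lt.2 (hbetween (j + 1 + m) h1 h2)
  rw [hfind]
  simp only []
  omega

lemma popAll_inv (ts : List Int) (i : Nat) (hi : i < ts.length) :
    ∀ (stack : List Nat) (days : List Int), NgeInv ts i days stack →
      NgeInv ts (i + 1) (popAll ts days stack i (tval ts i)).1
        (i :: (popAll ts days stack i (tval ts i)).2) := by
  intro stack
  induction stack with
  | nil =>
    intro days hInv
    obtain ⟨hlen, hltS, hpw, hint, hdays⟩ := hInv
    simp only [popAll]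
    refine ⟨hlen, ?_, by simp, ?_, ?_⟩
    · intro x hx; simp at hx; omega
    · intro x hx k hxk hk; simp at hx; omega
    · intro j hj
      rw [hdays j hj]
      have hiff : (j < i + 1 ∧ j ∉ ([i] : List Nat)) ↔ (j < i ∧ j ∉ ([] : List Nat)) := by
        simp; omega
      rw [if_congr hiff rfl rfl]
  | cons j rest IH =>
    intro days hInv
    obtain ⟨hlen, hltS, hpw, hint, hdays⟩ := hInv
    have hji : j < i := hltS j List.mem_cons_self
    have hpw' := (List.pairwise_cons.1 hpw)
    simp only [popAll]
    by_cases hc : PySem.List.pyGetD ts (j : Int) 0 < tval ts i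
    · rw [if_pos hc]
      apply IH
      refine ⟨by simpa using hlen, ?_, hpw'.2, ?_, ?_⟩
      · intro x hx; exact hltS x (List.mem_cons_of_mem _ hx)
      · intro x hx k hxk hk; exact hint x (List.mem_cons_of_mem _ hx) k hxk hk
      · intro j' hj'
        rw [getD_set]
        by_cases hjj : j = j'
        · subst hjj
          have hnotrest : j ∉ rest := fun hmem => by
            have := (hpw'.1 j hmem).1; omega
          rw [if_pos ⟨rfl, by omega⟩]
          have hspec : specF ts j = (i : Int) - (j : Int) :=
            spec_found ts j i hji hi (hint j List.mem_cons_self) hc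
          rw [if_pos ⟨hji, hnotrest⟩, hspec]
        · rw [if_neg (by tauto)]
          rw [hdays j' hj']
          have hiff : (j' < i ∧ j' ∉ rest) ↔ (j' < i ∧ j' ∉ j :: rest) := by
            simp only [List.mem_cons]
            constructor
            · rintro ⟨h1, h2⟩; exact ⟨h1, by tauto⟩
            · rintro ⟨h1, h2⟩; exact ⟨h1, by tauto⟩
          rw [if_congr hiff.symm rfl rfl]
    · rw [if_neg hc]
      have hts : tval ts i ≤ tval ts j := not_lt.1 hc
      have hall : ∀ x ∈ j :: rest, tval ts i ≤ tval ts x := by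
        intro x hx
        rcases List.mem_cons.1 hx with h | h
        · subst h; exact hts
        · exact le_trans hts (hpw'.1 x h).2
      refine ⟨hlen, ?_, ?_, ?_, ?_⟩
      · intro x hx
        rcases List.mem_cons.1 hx with h | h
        · omega
        · have := hltS x h; omega
      · rw [List.pairwise_cons]
        exact ⟨fun b hb => ⟨hltS b hb, hall b hb⟩, hpw⟩
      · intro x hx k hxk hk
        rcases List.mem_cons.1 hx with h | h
        · omega
        · by_cases hki : k = i
          · subst hki; exact hall x h
          · exact hint x h k hxk (by omega)
      · intro j' hj'
        rw [hdays j' hj']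
        have hiff : (j' < i + 1 ∧ j' ∉ i :: j :: rest) ↔ (j' < i ∧ j' ∉ j :: rest) := by
          simp only [List.mem_cons, not_or]
          constructor
          · rintro ⟨h1, h2, h3⟩; exact ⟨by omega, by tauto⟩
          · rintro ⟨h1, h2⟩
            refine ⟨by omega, by omega, ?_⟩
            simpa [not_or] using h2
        rw [if_congr hiff rfl rfl]

lemma B_fold_inv (ts : List Int) : ∀ m, m ≤ ts.length →
    NgeInv ts m
      ((List.range m).foldl
        (fun (st : List Int × List Nat) (i : Nat) =>
          let t := PySem.List.pyGetD ts (i : Int) 0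
          let p := popAll ts st.1 st.2 i t
          (p.1, i :: p.2)) (List.replicate ts.length 0, [])).1
      ((List.range m).foldl
        (fun (st : List Int × List Nat) (i : Nat) =>
          let t := PySem.List.pyGetD ts (i : Int) 0
          let p := popAll ts st.1 st.2 i t
          (p.1, i :: p.2)) (List.replicate ts.length 0, [])).2 := by
  intro m
  induction m with
  | zero =>
    intro _
    refine ⟨by simp, by simp, by simp, by simp, ?_⟩
    intro j hj
    simp only [List.range_zero, List.foldl_nil]
    rw [List.getD_replicate 0 hj]
    simp
  | succ m IH =>
    intro hm
    rw [List.range_succ, List.foldl_append, List.foldl_cons, List.foldl_nil]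
    exact popAll_inv ts m (by omega) _ _ (IH (by omega))

lemma B_eq_spec (ts : List Int) :
    next_higher_temp_alt ts = (List.range ts.length).map (specF ts) := by
  unfold next_higher_temp_alt
  obtain ⟨hlen, hltS, hpw, hint, hdays⟩ := B_fold_inv ts ts.length le_rfl
  apply List.ext_getElem
  · simpa using hlen
  intro j h1 h2
  have hj : j < ts.length := by simpa using h2
  have hd := hdays j hj
  rw [List.getElem_map, List.getElem_range, ← List.getD_eq_getElem _ 0 h1, hd]
  by_cases hmem : j ∈ ((List.range ts.length).foldl
      (fun (st : List Int × List Nat) (i : Nat) =>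
        let t := PySem.List.pyGetD ts (i : Int) 0
        let p := popAll ts st.1 st.2 i t
        (p.1, i :: p.2)) (List.replicate ts.length 0, [])).2
  · rw [if_neg (by tauto)]
    have hnone : (ts.drop (j + 1)).findIdx? (fun x => decide (tval ts j < x)) = none := by
      rw [List.findIdx?_eq_none_iff]
      intro x hx
      obtain ⟨m, hm, rfl⟩ := List.mem_iff_getElem.1 hx
      rw [List.getElem_drop]
      have h3 : j + 1 + m < ts.length := by simp at hm; omega
      rw [← tval_eq ts (j + 1 + m) h3]
      simpa using not_lt.2 (hint j hmem (j + 1 + m) (by omega) (by omega))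
    unfold specF
    rw [hnone]
  · rw [if_pos ⟨hj, hmem⟩]

-- ===== VERDICT (by name: the statement is the Claim_ definition above) =====
theorem next_higher_temp_spec : Claim_unchanged_next_higher_temp := by
  intro ts _ hD
  rw [A_eq_spec ts hD, B_eq_spec ts]

theorem next_higher_temp_changed : Claim_changed_next_higher_temp := by
  unfold Claim_changed_next_higher_temp; decide

theorem next_higher_temp_tight : Claim_exact_next_higher_temp := by
  intro ts _ hD
  subst hD
  decide
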